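-- pv_equiv track=rewrite | github.com/SemenSpace/ege_inf | ДОП/ь23 Р•™габ®п б ѓа•Ѓ°а†ІЃҐ†≠®•ђ з®б•Ђ/BASIS.py | task_23_3
-- ===== SOURCE A (Python) =====
-- def task_23_3(start, end):
--     if start > end:
--         return 0
--
--     if start == 27:  # мы не проходим через 27 -> у нас ноль дорог в этом числе
--         return 0
--
--     if start == end:
--         return 1
--
--     if start < end:
--         return task_23_3(start + 2, end) + task_23_3(start * 2, end)
-- ===== SOURCE B (Python) =====
-- def task_23_3(start, end):
--     if start > end:
--         return 0
--     dp = {}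
--     for v in range(end, start - 1, -1):
--         if v == 27:
--             dp[v] = 0
--         elif v == end:
--             dp[v] = 1
--         else:
--             dp[v] = dp.get(v + 2, 0) + dp.get(v * 2, 0)
--     return dp[start]
-- ===== Notes on version B (the rewrite author's own statement) =====
-- stated objective: faster
-- what changed: Replaces A's exponential top-down branching recursion with a single bottom-up dynamic-programming pass that fills a dict from end down to start, so each value is computed once.
import Mathlib
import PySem

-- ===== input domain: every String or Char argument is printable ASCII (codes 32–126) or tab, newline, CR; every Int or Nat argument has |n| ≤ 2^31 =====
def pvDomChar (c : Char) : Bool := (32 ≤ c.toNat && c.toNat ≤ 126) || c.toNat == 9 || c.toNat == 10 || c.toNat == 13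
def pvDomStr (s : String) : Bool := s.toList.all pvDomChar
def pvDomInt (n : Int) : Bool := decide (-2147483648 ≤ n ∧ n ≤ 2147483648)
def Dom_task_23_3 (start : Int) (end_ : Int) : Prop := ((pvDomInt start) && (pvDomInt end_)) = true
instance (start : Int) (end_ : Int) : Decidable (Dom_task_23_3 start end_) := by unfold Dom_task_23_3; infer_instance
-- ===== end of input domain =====

-- B replaces A's exponential branching recursion by one bottom-up dict DP pass (asymptotically faster).

-- ===== PORT A =====
-- A's recursion diverges for start ≤ 0 < end - start gaps (Python RecursionError), so the port
-- uses fuel; fuel (end_ - start).toNat + 1 is proved sufficient on Pre_ (fuel-irrelevance lemma below).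
def task23go : Nat → Int → Int → Int
  | 0, _, _ => 0
  | n+1, start, end_ =>
    if start > end_ then 0
    else if start = 27 then 0
    else if start = end_ then 1
    else task23go n (start + 2) end_ + task23go n (start * 2) end_

def task_23_3 (start : Int) (end_ : Int) : Int :=
  task23go ((end_ - start).toNat + 1) start end_

-- ===== PORT B =====
def bStep (end_ : Int) (dp : PySem.Dict Int Int) (v : Int) : PySem.Dict Int Int :=
  if v = 27 then dp.insert v 0
  else if v = end_ then dp.insert v 1
  else dp.insert v (dp.getD (v + 2) 0 + dp.getD (v * 2) 0)

def task_23_3_alt (start : Int) (end_ : Int) : Int :=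
  if start > end_ then 0
  else
    ((PySem.List.pyRange end_ (start - 1) (-1)).foldl (bStep end_)
      (PySem.Dict.empty : PySem.Dict Int Int)).getD start 0

-- ===== PRECONDITION & SPEC =====
-- Pre_ excludes exactly the inputs (start ≤ 0 and start < end) on which A's recursion never
-- terminates and Python raises RecursionError; A returns normally everywhere else.
def Pre_task_23_3 (start : Int) (end_ : Int) : Prop := 0 < start ∨ end_ ≤ start
instance (start : Int) (end_ : Int) : Decidable (Pre_task_23_3 start end_) := by
  unfold Pre_task_23_3; infer_instance

def pvWitness_task_23_3 : Int × Int := (2, 10)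

def Spec_task_23_3 (start : Int) (end_ : Int) (out : Int) : Prop := out = task_23_3_alt start end_
instance (start : Int) (end_ : Int) (out : Int) : Decidable (Spec_task_23_3 start end_ out) := by
  unfold Spec_task_23_3; infer_instance

-- ===== CLAIM (what is proved, stated in full; the proofs are below) =====
def Claim_equal_task_23_3 : Prop := ∀ (start : Int) (end_ : Int), Dom_task_23_3 start end_ → Pre_task_23_3 start end_ → Spec_task_23_3 start end_ (task_23_3 start end_)

-- ===== LEMMAS AND PROOFS =====

-- With positive start the recursion strictly shrinks (end - start), so any fuel above that gap
-- yields the same value as the canonical fuel used in the port.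
lemma task23go_irrel : ∀ (n : Nat) (start end_ : Int), 1 ≤ start → (end_ - start).toNat < n →
    task23go n start end_ = task23go ((end_ - start).toNat + 1) start end_ := by
  intro n
  induction n using Nat.strong_induction_on with
  | _ n ih =>
    intro start end_ h1 hlt
    match n, hlt with
    | n+1, hlt =>
      rw [task23go, task23go]
      by_cases hgt : start > end_
      · simp [hgt]
      by_cases h27 : start = 27
      · simp [h27]
      by_cases heq : start = end_
      · simp [heq]
      · simp only [if_neg hgt, if_neg h27, if_neg heq]
        have hsl : start < end_ := by omega
        have hgap1 : 1 ≤ (end_ - start).toNat := by omega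
        have hg2 : (end_ - (start + 2)).toNat < (end_ - start).toNat := by omega
        have hgd : (end_ - start * 2).toNat < (end_ - start).toNat := by omega
        rw [ih n (by omega) (start + 2) end_ (by omega) (by omega),
            ih n (by omega) (start * 2) end_ (by omega) (by omega),
            ih ((end_ - start).toNat) (by omega) (start + 2) end_ (by omega) (by omega),
            ih ((end_ - start).toNat) (by omega) (start * 2) end_ (by omega) (by omega)]

lemma A_gt {start end_ : Int} (h : end_ < start) : task_23_3 start end_ = 0 := by
  unfold task_23_3
  rw [task23go]
  simp [show start > end_ from h]

lemma A_le {start end_ : Int} (h1 : 1 ≤ start) (h : start ≤ end_) :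
    task_23_3 start end_ = if start = 27 then 0 else if start = end_ then 1
      else task_23_3 (start + 2) end_ + task_23_3 (start * 2) end_ := by
  unfold task_23_3
  rw [task23go]
  simp only [if_neg (show ¬ start > end_ by omega)]
  by_cases h27 : start = 27
  · simp [h27]
  by_cases heq : start = end_
  · simp [heq]
  · simp only [if_neg h27, if_neg heq]
    have hsl : start < end_ := by omega
    rw [task23go_irrel ((end_ - start).toNat) (start + 2) end_ (by omega) (by omega),
        task23go_irrel ((end_ - start).toNat) (start * 2) end_ (by omega) (by omega)]

-- the value B's loop body stores at w is exactly A's value there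
lemma bStep_eq_insert (end_ w : Int) (hw1 : 1 ≤ w) (hwle : w ≤ end_) (d : PySem.Dict Int Int)
    (hd : ∀ u, d.getD u 0 = if w + 1 ≤ u ∧ u ≤ end_ then task_23_3 u end_ else 0) :
    bStep end_ d w = d.insert w (task_23_3 w end_) := by
  unfold bStep
  by_cases h27 : w = 27
  · rw [if_pos h27, A_le hw1 hwle, if_pos h27]
  by_cases heq : w = end_
  · rw [if_neg h27, if_pos heq, A_le hw1 hwle, if_neg h27, if_pos heq]
  · rw [if_neg h27, if_neg heq, A_le hw1 hwle, if_neg h27, if_neg heq]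
    have e2 : d.getD (w + 2) 0 = task_23_3 (w + 2) end_ := by
      rw [hd]
      by_cases hin : w + 2 ≤ end_
      · rw [if_pos ⟨by omega, hin⟩]
      · rw [if_neg (by omega), A_gt (by omega)]
    have ed : d.getD (w * 2) 0 = task_23_3 (w * 2) end_ := by
      rw [hd]
      by_cases hin : w * 2 ≤ end_
      · rw [if_pos (by omega)]
      · rw [if_neg (by omega), A_gt (by omega)]
    rw [e2, ed]

lemma bStep_getD (end_ w : Int) (hw1 : 1 ≤ w) (hwle : w ≤ end_) (d : PySem.Dict Int Int)
    (hd : ∀ u, d.getD u 0 = if w + 1 ≤ u ∧ u ≤ end_ then task_23_3 u end_ else 0) :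
    ∀ u, (bStep end_ d w).getD u 0 = if w ≤ u ∧ u ≤ end_ then task_23_3 u end_ else 0 := by
  intro u
  rw [bStep_eq_insert end_ w hw1 hwle d hd, PySem.Dict.getD_insert]
  by_cases huw : u = w
  · subst huw; rw [if_pos rfl, if_pos (by omega)]
  · rw [if_neg huw, hd]
    by_cases hc : w + 1 ≤ u ∧ u ≤ end_
    · rw [if_pos hc, if_pos (by omega)]
    · rw [if_neg hc, if_neg (by omega)]

-- DP loop invariant: after processing end_ down to v, the dict holds A's value on [v, end_] and
-- defaults to 0 (= A's value above end_) everywhere else.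
lemma fold_inv (end_ v : Int) (hv : 1 ≤ v) : ∀ (k : Nat) (w : Int) (d : PySem.Dict Int Int),
    v ≤ w → w ≤ end_ → (w - v).toNat = k →
    (∀ u, d.getD u 0 = if w + 1 ≤ u ∧ u ≤ end_ then task_23_3 u end_ else 0) →
    ∀ u, ((PySem.List.pyRange w (v - 1) (-1)).foldl (bStep end_) d).getD u 0 =
      if v ≤ u ∧ u ≤ end_ then task_23_3 u end_ else 0 := by
  intro k
  induction k with
  | zero =>
    intro w d hvw hwe hk hd
    have hwv : w = v := by omega
    subst hwv
    rw [PySem.List.pyRange_neg_one_cons (by omega), PySem.List.pyRange_neg_one_eq_nil (by omega)]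
    simpa using bStep_getD end_ w (by omega) hwe d hd
  | succ k ih =>
    intro w d hvw hwe hk hd
    rw [PySem.List.pyRange_neg_one_cons (by omega)]
    simp only [List.foldl_cons]
    exact ih (w - 1) (bStep end_ d w) (by omega) (by omega) (by omega)
      (by intro u
          have := bStep_getD end_ w (by omega) hwe d hd u
          rw [this]
          by_cases hc : w ≤ u ∧ u ≤ end_
          · rw [if_pos hc, if_pos (by omega)]
          · rw [if_neg hc, if_neg (by omega)])

-- ===== VERDICT (by name: the statement is the Claim_ definition above) =====
theorem task_23_3_spec : Claim_equal_task_23_3 := by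
  intro start end_ _ hpre
  unfold Spec_task_23_3 task_23_3_alt
  by_cases hgt : start > end_
  · rw [if_pos hgt, A_gt (by omega)]
  rw [if_neg hgt]
  by_cases heq : start = end_
  · subst heq
    rw [PySem.List.pyRange_neg_one_cons (by omega), PySem.List.pyRange_neg_one_eq_nil (by omega)]
    unfold task_23_3
    rw [show (start - start).toNat = 0 from by omega, task23go]
    simp only [List.foldl_cons, List.foldl_nil]
    unfold bStep
    by_cases h27 : start = 27
    · simp [h27]
    · simp [h27]
  · have hs1 : 1 ≤ start := by
      rcases hpre with h | h
      · omega
      · omega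
    have := fold_inv end_ start hs1 ((end_ - start).toNat) end_ PySem.Dict.empty
      (by omega) (by omega) (by omega)
      (by intro u; rw [if_neg (by omega)]; simp [PySem.Dict.getD_empty]) start
    rw [this, if_pos (by omega)]
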